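-- pv_equiv track=rewrite | github.com/Michal0ss/WDI | WDI_algo/Zestaw_5/z167.py | zad_167
-- ===== SOURCE A (Python) =====
-- def zad_167(word):
--     vowels = ["a", "e", "i", "o", "u", "y"]
--
--     positions=[]
--     for i in range(len(word)):
--         if word[i] in vowels:
--             positions.append(i)
--
--     if len(positions) < 2: return 0
--
--     res = 1
--     for i in range(1, len(positions)):
--         res*=positions[i]-positions[i-1]
--         #mnożymy poniewaz to sa tak naprawde kombinacje a tak jak napisane wyzej
--         #ilosc kombinacji jest rownowazna odleglosci miedzy samogloskami czyli jesli sa rtylko dwie samogloski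
--         # to bierzemy tylko odleglosci miedzy nimi a jesli 3 to bierzemy odleglosci miedzy 1-2 i 2-3
--         return res
-- ===== SOURCE B (Python) =====
-- def zad_167(word):
--     vowels = "aeiouy"
--     first = None
--     for i, c in enumerate(word):
--         if c in vowels:
--             if first is None:
--                 first = i
--             else:
--                 return i - first
--     return 0
-- ===== Notes on version B (the rewrite author's own statement) =====
-- stated objective: simpler
-- what changed: Single forward scan with enumerate that remembers the first vowel index and returns immediately at the second vowel (A's loop always returns on its first iteration, so only the first gap matters); no positions list and no product loop are built.
import Mathlib
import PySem

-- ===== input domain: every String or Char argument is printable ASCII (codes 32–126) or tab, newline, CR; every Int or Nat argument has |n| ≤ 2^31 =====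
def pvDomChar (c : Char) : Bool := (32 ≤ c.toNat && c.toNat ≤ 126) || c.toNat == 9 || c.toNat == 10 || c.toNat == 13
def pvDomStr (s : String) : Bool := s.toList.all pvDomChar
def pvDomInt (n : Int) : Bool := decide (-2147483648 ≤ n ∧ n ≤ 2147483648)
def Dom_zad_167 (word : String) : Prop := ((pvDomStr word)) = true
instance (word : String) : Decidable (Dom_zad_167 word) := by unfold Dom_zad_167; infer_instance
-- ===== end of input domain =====

-- B replaces A's two passes (collect all vowel positions, then a product loop that in fact
-- returns on its first iteration) by one scan that returns second_vowel_index - first_vowel_index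
-- directly; objective: simpler.

-- ===== PORT A =====
def zad167Vowels : List Char := ['a', 'e', 'i', 'o', 'u', 'y']

-- the second Python loop: 'for i in range(1, len(positions)): res *= …; return res'
-- (returns inside its first iteration; [] is unreachable when positions.length ≥ 2 —
-- there Python would fall through and return None)
def zad167Loop2 (positions : List Int) (res : Int) : List Int → Int
  | [] => res
  | i :: _ => res * (PySem.List.pyGetD positions i 0 - PySem.List.pyGetD positions (i - 1) 0)

def zad_167 (word : String) : Int :=
  let l := word.toList
  let positions : List Int :=
    (List.range l.length).foldl
      (fun ps i => if l.getD i ' ' ∈ zad167Vowels then ps ++ [(i : Int)] else ps) []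
  if positions.length < 2 then 0
  else zad167Loop2 positions 1 (PySem.List.pyRange 1 positions.length 1)

-- ===== PORT B =====
-- the single scan of Source B: 'first' starts as None; second vowel returns i - first
def zad167Scan : List (Int × Char) → Option Int → Int
  | [], _ => 0
  | (i, c) :: rest, first =>
    if c ∈ zad167Vowels then
      match first with
      | none => zad167Scan rest (some i)
      | some f => i - f
    else zad167Scan rest first

def zad_167_alt (word : String) : Int :=
  zad167Scan (PySem.List.enumerate word.toList 0) none

-- ===== PRECONDITION & SPEC =====
def Spec_zad_167 (word : String) (out : Int) : Prop := out = zad_167_alt word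
instance (word : String) (out : Int) : Decidable (Spec_zad_167 word out) := by unfold Spec_zad_167; infer_instance

-- ===== CLAIM (what is proved, stated in full; the proofs are below) =====
def Claim_equal_zad_167 : Prop := ∀ (word : String), Dom_zad_167 word → Spec_zad_167 word (zad_167 word)

-- ===== LEMMAS AND PROOFS =====

-- positions of the vowels of l, counted from offset i (bridge between the two ports)
def vidx : List Char → Int → List Int
  | [], _ => []
  | c :: cs, i => if c ∈ zad167Vowels then i :: vidx cs (i + 1) else vidx cs (i + 1)

theorem vidx_append (a b : List Char) (i : Int) :
    vidx (a ++ b) i = vidx a i ++ vidx b (i + a.length) := by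
  induction a generalizing i with
  | nil => simp [vidx]
  | cons c cs ih =>
    simp only [List.cons_append, vidx, ih, List.length_cons]
    split_ifs <;> simp <;> ring_nf

theorem foldA_eq_vidx (l : List Char) (acc : List Int) :
    (List.range l.length).foldl
      (fun ps i => if l.getD i ' ' ∈ zad167Vowels then ps ++ [(i : Int)] else ps) acc
    = acc ++ vidx l 0 := by
  induction l using List.reverseRecOn generalizing acc with
  | nil => simp [vidx]
  | append_singleton l' c ih =>
    rw [List.length_append, List.length_singleton, List.range_succ, List.foldl_append]
    have hcong :
        (List.range l'.length).foldl
          (fun ps i => if (l' ++ [c]).getD i ' ' ∈ zad167Vowels then ps ++ [(i : Int)] else ps) acc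
        = (List.range l'.length).foldl
          (fun ps i => if l'.getD i ' ' ∈ zad167Vowels then ps ++ [(i : Int)] else ps) acc := by
      apply PySem.List.foldl_congr_mem
      intro ps i hi
      have hlt : i < l'.length := List.mem_range.mp hi
      rw [List.getD_append _ _ _ _ hlt]
    rw [hcong, ih, vidx_append]
    have hc : (l' ++ [c]).getD l'.length ' ' = c := by
      simp [List.getD_eq_getElem?_getD]
    simp only [List.foldl_cons, List.foldl_nil, hc, vidx]
    split_ifs <;> simp

theorem scanB_eq_vidx (l : List Char) (i : Int) :
    (zad167Scan (PySem.List.enumerate l i) none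
      = (match vidx l i with
         | a :: b :: _ => b - a
         | _ => 0))
    ∧ ∀ f : Int, zad167Scan (PySem.List.enumerate l i) (some f)
      = (match vidx l i with
         | b :: _ => b - f
         | [] => 0) := by
  induction l generalizing i with
  | nil => simp [PySem.List.enumerate_nil, zad167Scan, vidx]
  | cons c cs ih =>
    rw [PySem.List.enumerate_cons]
    constructor
    · simp only [zad167Scan, vidx]
      split_ifs with hv
      · rw [(ih (i + 1)).2 i]
        cases vidx cs (i + 1) <;> simp
      · exact (ih (i + 1)).1
    · intro f
      simp only [zad167Scan, vidx]
      split_ifs with hv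
      · simp
      · exact (ih (i + 1)).2 f

-- ===== VERDICT (by name: the statement is the Claim_ definition above) =====
theorem zad_167_spec : Claim_equal_zad_167 := by
  intro word _
  unfold Spec_zad_167 zad_167 zad_167_alt
  dsimp only
  rw [foldA_eq_vidx, List.nil_append, (scanB_eq_vidx word.toList 0).1]
  cases hv : vidx word.toList 0 with
  | nil => simp
  | cons a t =>
    cases t with
    | nil => simp
    | cons b rest =>
      have hlen : ¬ (a :: b :: rest).length < 2 := by simp
      simp only [hlen, if_false]
      rw [PySem.List.pyRange_one_cons (by simp)]
      simp [zad167Loop2, PySem.List.pyGetD]
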